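-- pv_equiv track=rewrite | github.com/shoc71/profile-maker | profile_resources/Important/remove_tabs_n_spaces.py | fixing_apostrophe
-- ===== SOURCE A (Python) =====
-- def fixing_apostrophe(name: str) -> str:
--     # Ensure apostrophe is followed by a lowercase letter
--     parts = name.split("'")
--     if len(parts) > 1:
--         for i in range(1, len(parts)):
--             if parts[i] and parts[i][0].isupper():
--                 parts[i] = parts[i][0].lower() + parts[i][1:]
--         name = "'".join(parts)
--     return name
-- ===== SOURCE B (Python) =====
-- def fixing_apostrophe(name: str) -> str:
--     # Single left-to-right scan: a flag remembers whether the previous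
--     # character was an apostrophe; such a character is lowercased if upper.
--     out = []
--     after = False
--     for ch in name:
--         out.append(ch.lower() if after and ch.isupper() else ch)
--         after = ch == "'"
--     return "".join(out)
-- ===== Notes on version B (the rewrite author's own statement) =====
-- stated objective: simpler
-- what changed: Replaces split-on-apostrophe / mutate-parts / rejoin with a single character scan that keeps a was-previous-char-an-apostrophe flag and lowercases an uppercase character exactly when the flag is set.
import Mathlib
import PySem

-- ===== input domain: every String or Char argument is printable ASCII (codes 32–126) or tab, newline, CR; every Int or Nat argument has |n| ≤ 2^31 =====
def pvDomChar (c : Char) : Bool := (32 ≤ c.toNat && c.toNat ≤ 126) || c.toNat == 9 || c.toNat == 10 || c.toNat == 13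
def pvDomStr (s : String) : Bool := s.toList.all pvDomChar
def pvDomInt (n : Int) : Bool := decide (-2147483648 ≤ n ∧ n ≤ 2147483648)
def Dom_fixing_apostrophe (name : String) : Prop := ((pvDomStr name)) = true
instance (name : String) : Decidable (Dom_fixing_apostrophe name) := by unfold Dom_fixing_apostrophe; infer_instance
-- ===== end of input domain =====

-- B replaces A's split/mutate-parts/rejoin with one character scan carrying an
-- "after apostrophe" flag (objective: simpler).

-- ===== PORT A =====
-- the body of A's for-loop: parts[i] = parts[i][0].lower() + parts[i][1:] when
-- parts[i] is nonempty and its first character is uppercase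
def pvFixBody (ps : List (List Char)) (i : Int) : List (List Char) :=
  match PySem.List.pyGet? ps i with
  | none => ps
  | some p =>
    match PySem.List.pyGet? p 0 with
    | none => ps                             -- parts[i] empty: falsy, skip
    | some c0 =>
      if PySem.Chars.isupper c0 then
        ps.set i.toNat (PySem.Chars.lower [c0] ++ PySem.List.slice p (some 1) none)
      else ps

def fixing_apostrophe (name : String) : String :=
  let parts := PySem.Chars.splitOn name.toList ['\'']
  if 1 < parts.length then
    String.ofList
      (PySem.Chars.join ['\'']
        ((PySem.List.pyRange 1 (parts.length : Int) 1).foldl pvFixBody parts))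
  else name

-- ===== PORT B =====
-- B's loop as the obvious structural recursion over the characters, carrying
-- the "previous character was an apostrophe" flag; each appended piece is the
-- one-character string Source B appends.
def pvScan (after : Bool) : List Char → List Char
  | [] => []
  | c :: rest =>
    (if after && PySem.Chars.isupper c then PySem.Chars.lower [c] else [c]) ++
      pvScan (c == '\'') rest

def fixing_apostrophe_alt (name : String) : String :=
  String.ofList (pvScan false name.toList)

-- ===== PRECONDITION & SPEC =====
def Spec_fixing_apostrophe (name : String) (out : String) : Prop := out = fixing_apostrophe_alt name
instance (name : String) (out : String) : Decidable (Spec_fixing_apostrophe name out) := by unfold Spec_fixing_apostrophe; infer_instance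

-- ===== CLAIM (what is proved, stated in full; the proofs are below) =====
def Claim_equal_fixing_apostrophe : Prop := ∀ (name : String), Dom_fixing_apostrophe name → Spec_fixing_apostrophe name (fixing_apostrophe name)

-- ===== LEMMAS AND PROOFS =====

-- structural characterisation of splitting on a single apostrophe:
-- pvSp l = (first part, remaining parts)
def pvSp : List Char → List Char × List (List Char)
  | [] => ([], [])
  | c :: r =>
    let hr := pvSp r
    if c = '\'' then ([], hr.1 :: hr.2) else (c :: hr.1, hr.2)

-- what A's loop body does to one part
def pvFixPart : List Char → List Char
  | [] => []
  | c :: t => if PySem.Chars.isupper c then PySem.Chars.lowerChar c :: t else c :: t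

theorem pvSp_cons_apos (r : List Char) :
    pvSp ('\''::r) = ([], (pvSp r).1 :: (pvSp r).2) := by
  simp [pvSp]

theorem pvSp_cons_ne (c : Char) (r : List Char) (h : c ≠ '\'') :
    pvSp (c::r) = (c :: (pvSp r).1, (pvSp r).2) := by
  simp [pvSp, h]

theorem pvGo_spec : ∀ (fuel : Nat) (l cur : List Char) (acc : List (List Char)),
    l.length ≤ fuel →
    PySem.Chars.splitOn.go ['\''] fuel l cur acc =
      acc.reverse ++ ((cur.reverse ++ (pvSp l).1) :: (pvSp l).2) := by
  intro fuel
  induction fuel with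
  | zero =>
    intro l cur acc h
    have : l = [] := List.length_eq_zero_iff.mp (Nat.le_zero.mp h)
    subst this
    simp [PySem.Chars.splitOn.go, pvSp]
  | succ f ih =>
    intro l cur acc h
    cases l with
    | nil => simp [PySem.Chars.splitOn.go, pvSp]
    | cons c rest =>
      rw [PySem.Chars.splitOn.go]
      have hpre : (['\''].isPrefixOf (c :: rest)) = (c == '\'') := by
        simp [List.isPrefixOf, eq_comm]
      by_cases hc : c = '\''
      · subst hc
        simp only [hpre, beq_self_eq_true, if_pos]
        rw [ih _ _ _ (by simpa using Nat.le_of_succ_le_succ h)]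
        simp [pvSp]
      · simp only [hpre, beq_eq_false_iff_ne.mpr hc, Bool.false_eq_true, if_neg,
          not_false_eq_true]
        rw [ih _ _ _ (by simpa using Nat.le_of_succ_le_succ h)]
        simp [pvSp, hc]

theorem pvSplitOn_eq (l : List Char) :
    PySem.Chars.splitOn l ['\''] = (pvSp l).1 :: (pvSp l).2 := by
  unfold PySem.Chars.splitOn
  rw [pvGo_spec _ _ _ _ (Nat.le_succ _)]
  simp

theorem pvJoin_single (s x : List Char) : PySem.Chars.join s [x] = x := by
  simp [PySem.Chars.join, List.intercalate]

theorem pvJoin_pair (s x y : List Char) (xs : List (List Char)) :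
    PySem.Chars.join s (x :: y :: xs) = x ++ s ++ PySem.Chars.join s (y :: xs) := by
  simp [PySem.Chars.join, List.intercalate]

theorem pvJoin_head_append (s e x : List Char) (xs : List (List Char)) :
    PySem.Chars.join s ((e ++ x) :: xs) = e ++ PySem.Chars.join s (x :: xs) := by
  cases xs with
  | nil => simp [PySem.Chars.join, List.intercalate]
  | cons y ys => simp [pvJoin_pair]

-- A's loop body applied at a position inside the list just fixes that part
theorem pvBody_step (pre : List (List Char)) (p : List Char) (t : List (List Char)) :
    pvFixBody (pre ++ p :: t) (pre.length : Int) = pre ++ pvFixPart p :: t := by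
  unfold pvFixBody
  rw [PySem.List.pyGet?_natCast]
  simp only [List.getElem?_append_right (Nat.le_refl _), Nat.sub_self,
    List.getElem?_cons_zero]
  cases p with
  | nil => simp [pvFixPart, PySem.List.pyGet?, PySem.List.pyIdx?]
  | cons c rest =>
    have hget : PySem.List.pyGet? (c :: rest) 0 = some c := by
      simp [PySem.List.pyGet?, PySem.List.pyIdx?]
    rw [hget]
    by_cases hu : PySem.Chars.isupper c
    · simp only [hu, if_pos]
      have hslice : PySem.List.slice (c :: rest) (some 1) none = rest := by
        simp [PySem.List.slice, PySem.List.clampIdx]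
      rw [hslice]
      have hset : (pre ++ (c :: rest) :: t).set pre.length
          (PySem.Chars.lower [c] ++ rest) = pre ++ (PySem.Chars.lower [c] ++ rest) :: t := by
        rw [List.set_append]
        simp
      simp only [Int.toNat_natCast, hset, pvFixPart, hu, if_pos]
      simp [PySem.Chars.lower]
    · simp [hu, pvFixPart]

theorem pvLoop_go : ∀ (t pre : List (List Char)),
    (PySem.List.pyRange (pre.length : Int) ((pre.length + t.length : Nat) : Int) 1).foldl
        pvFixBody (pre ++ t) = pre ++ t.map pvFixPart := by
  intro t
  induction t with
  | nil =>
    intro pre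
    simp only [List.length_nil, Nat.add_zero, List.append_nil, List.map_nil]
    rw [show PySem.List.pyRange (pre.length : Int) ((pre.length : Nat) : Int) 1 = [] from by
      simp [PySem.List.pyRange]]
    rfl
  | cons p t' ih =>
    intro pre
    have hlt : (pre.length : Int) < ((pre.length + (p :: t').length : Nat) : Int) := by
      simp only [List.length_cons]
      omega
    rw [PySem.List.pyRange_one_cons hlt, List.foldl_cons, pvBody_step]
    have h1 : pre ++ pvFixPart p :: t' = (pre ++ [pvFixPart p]) ++ t' := by simp
    have h2 : ((pre.length : Int) + 1) = ((pre ++ [pvFixPart p]).length : Int) := by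
      simp
    have h3 : ((pre.length + (p :: t').length : Nat) : Int)
        = (((pre ++ [pvFixPart p]).length + t'.length : Nat) : Int) := by
      push_cast
      simp only [List.length_cons, List.length_append, List.length_nil]
      push_cast
      omega
    rw [h1, h2, h3, ih (pre ++ [pvFixPart p])]
    simp

theorem pvLoop_all (h : List Char) (t : List (List Char)) :
    (PySem.List.pyRange 1 (((h :: t).length : Nat) : Int) 1).foldl pvFixBody (h :: t)
      = h :: t.map pvFixPart := by
  have hg := pvLoop_go t [h]
  simp only [List.singleton_append, List.length_cons, List.length_nil] at hg ⊢
  push_cast at hg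
  rw [show (1 : Int) + (t.length : Int) = (t.length : Int) + 1 from by omega] at hg
  exact hg

-- the split/fix/join pipeline equals the single scan, for either flag value
theorem pvMain : ∀ (l : List Char) (flag : Bool),
    PySem.Chars.join ['\'']
        ((if flag then pvFixPart (pvSp l).1 else (pvSp l).1) :: (pvSp l).2.map pvFixPart)
      = pvScan flag l := by
  intro l
  induction l with
  | nil => intro flag; cases flag <;> simp [pvSp, pvFixPart, pvScan]
  | cons c r ih =>
    intro flag
    by_cases hc : c = '\''
    · subst hc
      rw [pvSp_cons_apos]
      have hfix : (if flag then pvFixPart ([], (pvSp r).1 :: (pvSp r).2).1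
          else ([], (pvSp r).1 :: (pvSp r).2).1) = ([] : List Char) := by
        cases flag <;> simp [pvFixPart]
      rw [hfix]
      simp only [List.map_cons]
      rw [pvJoin_pair]
      rw [show pvFixPart (pvSp r).1
          = (if true then pvFixPart (pvSp r).1 else (pvSp r).1) from rfl, ih true]
      simp [pvScan, show PySem.Chars.isupper '\'' = false from by decide]
    · rw [pvSp_cons_ne c r hc]
      have hhead : (if flag then pvFixPart (c :: (pvSp r).1, (pvSp r).2).1
            else (c :: (pvSp r).1, (pvSp r).2).1)
          = (if flag && PySem.Chars.isupper c then PySem.Chars.lower [c] else [c])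
            ++ (pvSp r).1 := by
        cases flag with
        | false => simp
        | true =>
          simp only [pvFixPart, Bool.true_and]
          by_cases hu : PySem.Chars.isupper c <;> simp [hu, PySem.Chars.lower]
      rw [hhead]
      simp only
      rw [pvJoin_head_append,
        show (pvSp r).1 = (if false then pvFixPart (pvSp r).1 else (pvSp r).1) from rfl,
        ih false]
      simp [pvScan, beq_eq_false_iff_ne.mpr hc]

theorem pvSp_no_apos (l : List Char) (h : (pvSp l).2 = []) : (pvSp l).1 = l := by
  induction l with
  | nil => rfl
  | cons c r ih =>
    by_cases hc : c = '\''
    · exfalso; rw [pvSp] at h; simp [hc] at h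
    · rw [pvSp] at h ⊢
      simp only [if_neg hc] at h ⊢
      rw [ih h]

-- ===== VERDICT (by name: the statement is the Claim_ definition above) =====
theorem fixing_apostrophe_spec : Claim_equal_fixing_apostrophe := by
  intro name _
  unfold Spec_fixing_apostrophe fixing_apostrophe fixing_apostrophe_alt
  rw [pvSplitOn_eq]
  by_cases h : 1 < ((pvSp name.toList).1 :: (pvSp name.toList).2).length
  · rw [if_pos h, pvLoop_all]
    rw [show (pvSp name.toList).1
        = (if false then pvFixPart (pvSp name.toList).1 else (pvSp name.toList).1) from rfl,
      pvMain]
  · rw [if_neg h]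
    have h2 : (pvSp name.toList).2 = [] := by
      simp only [List.length_cons, not_lt] at h
      exact List.length_eq_zero_iff.mp (by omega)
    have hm := pvMain name.toList false
    simp only [if_neg (Bool.false_ne_true), h2, List.map_nil, pvJoin_single] at hm
    rw [← hm, pvSp_no_apos _ h2, String.ofList_toList]
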